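-- pv_equiv track=rewrite | github.com/nayutazyc-code/TJU-latex-docx | src/latex_docx_converter/tikz_renderer.py | first_error_line
-- ===== SOURCE A (Python) =====
-- def first_error_line(output: str) -> str:
--     for line in output.splitlines():
--         stripped = line.strip()
--         if stripped.startswith("!") or "Error" in stripped or "error" in stripped:
--             return stripped
--     for line in output.splitlines():
--         stripped = line.strip()
--         if stripped:
--             return stripped[:160]
--     return "no diagnostic output"
-- ===== SOURCE B (Python) =====
-- def first_error_line(output: str) -> str:
--     candidate = None
--     for line in output.splitlines():
--         stripped = line.strip()
--         if stripped.startswith("!") or "Error" in stripped or "error" in stripped: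
--             return stripped
--         if candidate is None and stripped:
--             candidate = stripped[:160]
--     return candidate if candidate is not None else "no diagnostic output"
-- ===== Notes on version B (the rewrite author's own statement) =====
-- stated objective: simpler
-- what changed: Replaces A's two separate passes over output.splitlines() with a single pass that returns an error line immediately and records the first non-empty line as a fallback candidate.
import Mathlib
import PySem

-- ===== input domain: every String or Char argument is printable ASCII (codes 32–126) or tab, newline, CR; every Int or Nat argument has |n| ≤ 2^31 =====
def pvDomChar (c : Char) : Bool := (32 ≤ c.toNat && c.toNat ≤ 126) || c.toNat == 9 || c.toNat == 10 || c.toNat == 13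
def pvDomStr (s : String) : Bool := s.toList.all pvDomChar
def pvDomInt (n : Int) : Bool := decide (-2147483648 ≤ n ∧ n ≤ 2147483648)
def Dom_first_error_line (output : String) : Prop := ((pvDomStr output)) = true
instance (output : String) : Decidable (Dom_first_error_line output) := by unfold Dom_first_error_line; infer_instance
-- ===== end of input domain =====

-- B changes the decomposition only: one pass recording a fallback candidate instead of A's two passes; same return value everywhere.

-- ===== PORT A =====
-- shared predicate: stripped.startswith("!") or "Error" in stripped or "error" in stripped
def felErr (s : String) : Bool :=
  PySem.Str.startswith s "!" || PySem.Str.isIn "Error" s || PySem.Str.isIn "error" s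

-- A's first loop (early return)
def felLoop1 : List String → Option String
  | [] => none
  | l :: rest =>
    let s := PySem.Str.strip l
    if felErr s then some s else felLoop1 rest

-- A's second loop (early return)
def felLoop2 : List String → Option String
  | [] => none
  | l :: rest =>
    let s := PySem.Str.strip l
    if s ≠ "" then some (PySem.Str.slice s none (some 160)) else felLoop2 rest

def first_error_line (output : String) : String :=
  match felLoop1 (PySem.Str.splitlines output) with
  | some r => r
  | none =>
    match felLoop2 (PySem.Str.splitlines output) with
    | some r => r
    | none => "no diagnostic output"

-- ===== PORT B =====
-- B's single loop: early return on an error line, first non-empty stripped line kept as candidate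
def felLoopB : List String → Option String → String
  | [], cand => cand.getD "no diagnostic output"
  | l :: rest, cand =>
    let s := PySem.Str.strip l
    if felErr s then s
    else if cand = none ∧ s ≠ "" then felLoopB rest (some (PySem.Str.slice s none (some 160)))
    else felLoopB rest cand

def first_error_line_alt (output : String) : String :=
  felLoopB (PySem.Str.splitlines output) none

-- ===== PRECONDITION & SPEC =====
def Spec_first_error_line (output : String) (out : String) : Prop := out = first_error_line_alt output
instance (output : String) (out : String) : Decidable (Spec_first_error_line output out) := by unfold Spec_first_error_line; infer_instance

-- ===== CLAIM (what is proved, stated in full; the proofs are below) =====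
def Claim_equal_first_error_line : Prop := ∀ (output : String), Dom_first_error_line output → Spec_first_error_line output (first_error_line output)

-- ===== LEMMAS AND PROOFS =====

-- loop invariant: B's single pass equals A's first pass, falling back to the candidate, then A's second pass
theorem felLoopB_eq (lines : List String) (cand : Option String) :
    felLoopB lines cand =
      match felLoop1 lines with
      | some r => r
      | none =>
        match cand with
        | some c => c
        | none =>
          match felLoop2 lines with
          | some r => r
          | none => "no diagnostic output" := by
  induction lines generalizing cand with
  | nil => cases cand <;> simp [felLoopB, felLoop1, felLoop2, Option.getD]
  | cons l rest ih =>
    simp only [felLoopB, felLoop1, felLoop2]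
    by_cases he : felErr (PySem.Str.strip l)
    · simp [he]
    · by_cases hs : PySem.Str.strip l = ""
      · rw [hs] at he
        simp [he, hs, ih]
      · cases cand with
        | none =>
          simp only [he, hs, ih, ne_eq, not_false_iff, if_false, if_true, Bool.false_eq_true,
            and_true]
        | some c => simp [he, hs, ih]

-- ===== VERDICT (by name: the statement is the Claim_ definition above) =====
theorem first_error_line_spec : Claim_equal_first_error_line := by
  intro output _
  unfold Spec_first_error_line first_error_line first_error_line_alt
  rw [felLoopB_eq]
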